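-- pv_equiv track=rewrite | github.com/NurdauletSovetkhan/compute-math | week-1/assignment-4/part-2/newton_backward.py | calculate_backward_differences
-- ===== SOURCE A (Python) =====
-- def calculate_backward_differences(y_values: list) -> list:
--     """
--     Calculate backward difference table.
--
--     Parameters:
--         y_values: List of y values
--
--     Returns:
--         List of difference lists, where differences[i] contains (i+1)-th order differences
--     """
--     differences = []
--     current = y_values[:]
--
--     while len(current) > 1:
--         next_diff = []
--         for i in range(1, len(current)):
--             next_diff.append(current[i] - current[i - 1])
--         differences.append(next_diff)
--         current = next_diff
--
--     return differences
-- ===== SOURCE B (Python) =====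
-- def calculate_backward_differences(y_values: list) -> list:
--     """Online construction: one pass over y_values maintaining the diagonal
--     of latest differences; each incoming y extends every row by one entry."""
--     differences = []
--     diag = []  # diag[0] = last y seen, diag[j+1] = last entry of differences[j]
--     for y in y_values:
--         prev = y
--         new_diag = [y]
--         for j, d in enumerate(diag):
--             nd = prev - d
--             if j < len(differences):
--                 differences[j].append(nd)
--             else:
--                 differences.append([nd])
--             new_diag.append(nd)
--             prev = nd
--         diag = new_diag
--     return differences
-- ===== Notes on version B (the rewrite author's own statement) =====
-- stated objective: alternative
-- what changed: Replaces A's row-by-row while-loop (recompute each whole difference row from the previous row) with a single online pass over y_values that maintains the diagonal of latest differences and appends one new entry to every row per incoming value.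
import Mathlib
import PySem

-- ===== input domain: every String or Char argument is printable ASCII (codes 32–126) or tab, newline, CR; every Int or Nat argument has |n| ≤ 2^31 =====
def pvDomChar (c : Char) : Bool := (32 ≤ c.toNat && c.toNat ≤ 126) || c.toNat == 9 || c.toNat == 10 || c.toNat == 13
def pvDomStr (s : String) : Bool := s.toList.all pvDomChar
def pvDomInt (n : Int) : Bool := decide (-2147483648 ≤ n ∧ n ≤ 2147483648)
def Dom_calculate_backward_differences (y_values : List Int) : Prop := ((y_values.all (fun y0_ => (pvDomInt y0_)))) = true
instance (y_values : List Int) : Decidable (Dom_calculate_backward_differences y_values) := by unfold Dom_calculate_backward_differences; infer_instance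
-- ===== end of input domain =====

-- B replaces A's row-by-row while-loop with a single online pass that maintains the
-- diagonal of latest differences and extends every row by one entry per input value
-- (objective: alternative decomposition, same exact results).


-- ===== PORT A =====
-- inner 'for i in range(1, len(current)): next_diff.append(current[i] - current[i-1])'
-- (indices are always in range, so pyGetD's default 0 is never used)
def pvA_inner (current : List Int) : List Int :=
  (PySem.List.pyRange 1 (current.length : Int) 1).foldl
    (fun next_diff i =>
      next_diff ++ [PySem.List.pyGetD current i 0 - PySem.List.pyGetD current (i - 1) 0])
    []

-- length fact needed by pvA_loop's termination proof
theorem pvA_inner_length (c : List Int) : (pvA_inner c).length = c.length - 1 := by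
  unfold pvA_inner
  rw [PySem.List.foldl_append_singleton_eq_map]
  simp [PySem.List.length_pyRange_one]

-- 'while len(current) > 1: … differences.append(next_diff); current = next_diff'
def pvA_loop (differences : List (List Int)) (current : List Int) : List (List Int) :=
  if 1 < current.length then
    let next_diff := pvA_inner current
    pvA_loop (differences ++ [next_diff]) next_diff
  else differences
termination_by current.length
decreasing_by rw [pvA_inner_length]; omega

-- 'current = y_values[:]' is a copy; identical as a value
def calculate_backward_differences (y_values : List Int) : List (List Int) :=
  pvA_loop [] y_values

-- ===== PORT B =====
-- body of 'for j, d in enumerate(diag)' in Source B: the in-place mutation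
-- 'differences[j].append(nd)' / 'differences.append([nd])' is modelled by set/append
def pvB_body (s : List (List Int) × List Int × Int) (jd : Int × Int) :
    List (List Int) × List Int × Int :=
  let differences := s.1
  let nd := s.2.2 - jd.2
  let differences' :=
    if jd.1 < (differences.length : Int) then
      differences.set jd.1.toNat ((differences.getD jd.1.toNat []) ++ [nd])
    else differences ++ [[nd]]
  (differences', s.2.1 ++ [nd], nd)

-- one iteration of 'for y in y_values': state (differences, diag); 'new_diag = [y]', 'prev = y'
def pvB_step (st : List (List Int) × List Int) (y : Int) : List (List Int) × List Int :=
  let r := (PySem.List.enumerate st.2 0).foldl pvB_body (st.1, [y], y)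
  (r.1, r.2.1)

def calculate_backward_differences_alt (y_values : List Int) : List (List Int) :=
  (y_values.foldl pvB_step ([], [])).1

-- ===== PRECONDITION & SPEC =====
def Spec_calculate_backward_differences (y_values : List Int) (out : List (List Int)) : Prop := out = calculate_backward_differences_alt y_values
instance (y_values : List Int) (out : List (List Int)) : Decidable (Spec_calculate_backward_differences y_values out) := by unfold Spec_calculate_backward_differences; infer_instance

-- ===== CLAIM (what is proved, stated in full; the proofs are below) =====
def Claim_equal_calculate_backward_differences : Prop := ∀ (y_values : List Int), Dom_calculate_backward_differences y_values → Spec_calculate_backward_differences y_values (calculate_backward_differences y_values)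

-- ===== LEMMAS AND PROOFS =====

-- successive pairwise differences, structurally
def diffList : List Int → List Int
  | [] => []
  | [_] => []
  | a :: b :: t => (b - a) :: diffList (b :: t)

theorem diffList_length : ∀ (l : List Int), (diffList l).length = l.length - 1
  | [] => rfl
  | [_] => rfl
  | _ :: b :: t => by simp [diffList, diffList_length (b :: t)]

-- the full table, as A builds it: rows of repeated differences
def rowsSpec (l : List Int) : List (List Int) :=
  if 1 < l.length then diffList l :: rowsSpec (diffList l) else []
termination_by l.length
decreasing_by rw [diffList_length]; omega

-- the diagonal of latest values: last element of l, of diffList l, of diffList² l, …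
def diagSpec (l : List Int) : List Int :=
  if l.length ≠ 0 then l.getLastD 0 :: diagSpec (diffList l) else []
termination_by l.length
decreasing_by rw [diffList_length]; omega

-- structural model of Source B's inner loop: consume diag in lockstep with the rows
def innerB : Int → List Int → List (List Int) → List (List Int) × List Int
  | _, [], rows => (rows, [])
  | prev, d :: ds, [] =>
      let nd := prev - d
      let r := innerB nd ds []
      ([nd] :: r.1, nd :: r.2)
  | prev, d :: ds, row :: rows =>
      let nd := prev - d
      let r := innerB nd ds rows
      ((row ++ [nd]) :: r.1, nd :: r.2)

theorem diffList_getD : ∀ (l : List Int) (k : Nat), k < (diffList l).length →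
    (diffList l).getD k 0 = l.getD (k + 1) 0 - l.getD k 0
  | a :: b :: t, 0, _ => by simp [diffList]
  | a :: b :: t, k + 1, h => by
      have := diffList_getD (b :: t) k (by simpa [diffList] using h)
      simpa [diffList] using this

theorem diffList_snoc : ∀ (l : List Int), l ≠ [] →
    ∀ y, diffList (l ++ [y]) = diffList l ++ [y - l.getLastD 0]
  | [a], _, y => by simp [diffList]
  | a :: b :: t, _, y => by
      have := diffList_snoc (b :: t) (by simp) y
      simp only [List.cons_append, diffList] at this ⊢
      rw [this]
      simp

-- A's index loop computes diffList
theorem pvA_inner_eq (c : List Int) : pvA_inner c = diffList c := by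
  unfold pvA_inner
  rw [PySem.List.foldl_append_singleton_eq_map]
  apply List.ext_getElem
  · simp [PySem.List.length_pyRange_one, diffList_length]
  · intro k h1 h2
    simp only [List.nil_append]
    rw [List.getElem_map, PySem.List.getElem_pyRange_one]
    have hk : k < (diffList c).length := h2
    have hlen : (diffList c).length = c.length - 1 := diffList_length c
    have h1' : (1 : Int) + k = ((k + 1 : Nat) : Int) := by push_cast; ring
    have h2' : ((k + 1 : Nat) : Int) - 1 = ((k : Nat) : Int) := by push_cast; ring
    rw [h1', h2', PySem.List.pyGetD_natCast, PySem.List.pyGetD_natCast]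
    have := diffList_getD c k hk
    rw [List.getElem_eq_getD (fallback := 0), this]

-- A's while loop computes rowsSpec
theorem pvA_loop_eq (c : List Int) : ∀ acc, pvA_loop acc c = acc ++ rowsSpec c := by
  induction hn : c.length using Nat.strong_induction_on generalizing c with
  | _ n ih =>
    intro acc
    rw [pvA_loop, rowsSpec]
    by_cases h : 1 < c.length
    · simp only [if_pos h, pvA_inner_eq]
      rw [ih (diffList c).length (by rw [diffList_length]; omega) (diffList c) rfl]
      simp
    · simp [if_neg h]

-- helper facts for the indexed fold: access/update at the split point
theorem getD_append_length : ∀ (done : List (List Int)) (r : List Int) (rs : List (List Int)),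
    (done ++ r :: rs).getD done.length [] = r
  | [], r, rs => rfl
  | _ :: t, r, rs => getD_append_length t r rs

theorem set_append_length : ∀ (done : List (List Int)) (v r : List Int) (rs : List (List Int)),
    (done ++ r :: rs).set done.length v = done ++ v :: rs
  | [], v, r, rs => rfl
  | x :: t, v, r, rs => by simp [set_append_length t v r rs]

-- Source B's indexed fold equals the structural innerB
theorem foldB_eq : ∀ (ds : List Int) (done rest : List (List Int)) (nds : List Int) (prev : Int),
    (PySem.List.enumerate ds (done.length : Int)).foldl pvB_body (done ++ rest, nds, prev)
      = (done ++ (innerB prev ds rest).1, nds ++ (innerB prev ds rest).2,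
         (innerB prev ds rest).2.getLastD prev)
  | [], done, rest, nds, prev => by simp [PySem.List.enumerate_nil, innerB]
  | d :: ds, done, rest, nds, prev => by
    rw [PySem.List.enumerate_cons, List.foldl_cons]
    cases rest with
    | nil =>
      have hbody : pvB_body (done ++ [], nds, prev) ((done.length : Int), d)
          = ((done ++ [[prev - d]]) ++ [], nds ++ [prev - d], prev - d) := by
        simp [pvB_body]
      rw [hbody]
      have hlen : ((done.length : Int) + 1) = (((done ++ [[prev - d]]).length : Nat) : Int) := by
        simp
      rw [hlen, foldB_eq ds (done ++ [[prev - d]]) [] (nds ++ [prev - d]) (prev - d)]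
      simp only [innerB]
      rw [List.getLastD_cons]
      simp
    | cons r rs =>
      have hbody : pvB_body (done ++ r :: rs, nds, prev) ((done.length : Int), d)
          = ((done ++ [r ++ [prev - d]]) ++ rs, nds ++ [prev - d], prev - d) := by
        simp only [pvB_body]
        rw [if_pos (by simp)]
        simp only [Int.toNat_natCast, getD_append_length, set_append_length]
        simp
      rw [hbody]
      have hlen : ((done.length : Int) + 1) = (((done ++ [r ++ [prev - d]]).length : Nat) : Int) := by
        simp
      rw [hlen, foldB_eq ds (done ++ [r ++ [prev - d]]) rs (nds ++ [prev - d]) (prev - d)]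
      simp only [innerB]
      rw [List.getLastD_cons]
      simp

-- the online step: absorbing y into the table of l yields the table of l ++ [y]
theorem innerB_spec (l : List Int) (hne : l ≠ []) (y : Int) :
    innerB y (diagSpec l) (rowsSpec l)
      = (rowsSpec (l ++ [y]), diagSpec (diffList (l ++ [y]))) := by
  induction hn : l.length using Nat.strong_induction_on generalizing l y with
  | _ n ih =>
    have hsnoc := diffList_snoc l hne y
    by_cases h1 : l.length = 1
    · obtain ⟨a, rfl⟩ : ∃ a, l = [a] := by
        cases l with
        | nil => simp at h1
        | cons a t => cases t with
          | nil => exact ⟨a, rfl⟩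
          | cons b t' => simp at h1
      rw [diagSpec, rowsSpec]
      simp only [List.length_cons, List.length_nil, if_neg (by simp : ¬ (1:Nat) < 1)]
      rw [if_pos (by simp)]
      rw [diagSpec]
      simp only [diffList, List.length_nil, ne_eq, not_true_eq_false, if_false]
      show innerB y [a] [] = _
      rw [rowsSpec]
      simp only [List.length_append, List.length_cons, List.length_nil]
      rw [if_pos (by simp)]
      have : diffList ([a] ++ [y]) = [y - a] := by simp [diffList]
      rw [this, rowsSpec, diagSpec]
      simp [innerB, diffList, diagSpec]
    · have h2 : 1 < l.length := by
        cases l with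
        | nil => exact absurd rfl hne
        | cons a t => cases t with
          | nil => simp at h1
          | cons b t' => simp
      have hd_ne : diffList l ≠ [] := by
        have := diffList_length l
        intro hc; rw [hc] at this; simp at this; omega
      rw [diagSpec, if_pos (by omega), rowsSpec, if_pos h2]
      show innerB y (l.getLastD 0 :: diagSpec (diffList l)) (diffList l :: rowsSpec (diffList l)) = _
      have hIH := ih (diffList l).length (by rw [diffList_length]; omega) (diffList l) hd_ne
        (y - l.getLastD 0) rfl
      have hlen' : 1 < (l ++ [y]).length := by simp; omega
      have hrows : rowsSpec (l ++ [y])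
          = (diffList l ++ [y - l.getLastD 0]) :: rowsSpec (diffList l ++ [y - l.getLastD 0]) := by
        rw [rowsSpec, if_pos hlen', hsnoc]
      have hdiag : diagSpec (diffList (l ++ [y]))
          = (y - l.getLastD 0) :: diagSpec (diffList (diffList l ++ [y - l.getLastD 0])) := by
        rw [hsnoc, diagSpec, if_pos (by simp), List.getLastD_concat]
      simp only [innerB]
      rw [hIH, hrows, hdiag]

-- the outer foldl maintains (rowsSpec, diagSpec)
theorem pvB_invariant (ys : List Int) :
    ys.foldl pvB_step ([], []) = (rowsSpec ys, diagSpec ys) := by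
  induction ys using List.reverseRecOn with
  | nil => simp [rowsSpec, diagSpec]
  | append_singleton ys y ih =>
    rw [List.foldl_append, List.foldl_cons, List.foldl_nil, ih]
    cases hys : ys with
    | nil =>
      simp only [pvB_step]
      rw [rowsSpec, diagSpec]
      simp only [List.length_nil]
      rw [if_neg (by simp), if_neg (by simp)]
      rw [PySem.List.enumerate_nil]
      simp only [List.foldl_nil]
      rw [rowsSpec, diagSpec]
      simp [diffList, diagSpec]
    | cons a t =>
      rw [← hys]
      have hne : ys ≠ [] := by rw [hys]; simp
      simp only [pvB_step]
      have h0 : (0 : Int) = (([] : List (List Int)).length : Int) := by simp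
      have := foldB_eq (diagSpec ys) [] (rowsSpec ys) [y] y
      simp only [List.length_nil, Int.natCast_zero, List.nil_append] at this
      rw [this, innerB_spec ys hne y]
      rw [show diagSpec (ys ++ [y]) = y :: diagSpec (diffList (ys ++ [y])) by
        rw [diagSpec, if_pos (by simp), List.getLastD_concat]]
      simp

-- ===== VERDICT (by name: the statement is the Claim_ definition above) =====
theorem calculate_backward_differences_spec : Claim_equal_calculate_backward_differences := by
  intro y_values _
  unfold Spec_calculate_backward_differences calculate_backward_differences
    calculate_backward_differences_alt
  rw [pvA_loop_eq y_values [], pvB_invariant y_values]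
  simp
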